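-- pv_equiv track=rewrite | github.com/gafarchik/codewars-python-kata | kyu3/Alphabetic Anagrams.py | listPosition
-- ===== SOURCE A (Python) =====
-- from collections import Counter
--
-- def listPosition(word):
--     word_len, d, l = len(word), 1, 1
--     count = Counter()
--     for i in range(word_len):
--         wrd = word[(word_len - 1) - i]
--         count[wrd] += 1
--         for s in count:
--             if (s < wrd):
--                 d += l * count[s] // count[wrd]
--         l = l * (i + 1) // count[wrd]
--     return d
-- ===== SOURCE B (Python) =====
-- from math import factorial
--
-- def listPosition(word):
--     n = len(word)
--     rank = 1
--     for i in range(n):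
--         rest = word[i:]
--         denom = 1
--         for c in set(rest):
--             denom *= factorial(rest.count(c))
--         smaller = 0
--         for s in set(rest):
--             if s < rest[0]:
--                 smaller += rest.count(s)
--         rank += smaller * factorial(n - 1 - i) // denom
--     return rank
-- ===== Notes on version B (the rewrite author's own statement) =====
-- stated objective: alternative
-- what changed: B computes the rank left-to-right by recomputing, at each position, the closed-form multinomial contribution (suffix character counts, factorials and one exact integer division) from scratch, instead of A's right-to-left loop that threads running accumulators d and l and an incrementally updated Counter.
import Mathlib
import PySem

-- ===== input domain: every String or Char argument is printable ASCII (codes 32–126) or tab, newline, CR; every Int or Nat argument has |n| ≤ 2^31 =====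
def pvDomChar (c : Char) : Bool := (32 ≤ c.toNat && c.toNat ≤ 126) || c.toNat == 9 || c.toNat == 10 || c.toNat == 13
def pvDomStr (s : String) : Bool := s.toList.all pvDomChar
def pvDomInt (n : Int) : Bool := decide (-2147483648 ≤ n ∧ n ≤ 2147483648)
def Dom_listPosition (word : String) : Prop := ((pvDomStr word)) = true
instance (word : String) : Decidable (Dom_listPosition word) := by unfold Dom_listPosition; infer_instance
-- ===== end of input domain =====

-- B recomputes each position's contribution from scratch with the closed-form multinomial
-- (factorials over the remaining suffix, left-to-right), instead of A's right-to-left threaded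
-- accumulators; objective: alternative decomposition (not faster).

-- ===== PORT A =====
def listPosition (word : String) : Int :=
  let word_len : Int := PySem.Str.len word
  let st := (PySem.List.pyRange 0 word_len 1).foldl
    (fun (st : Int × Int × PySem.Dict Char Int) i =>
      let wrd : Char := PySem.List.pyGetD word.toList ((word_len - 1) - i) ' '
      let count := st.2.2.modify wrd 0 (fun x => x + 1)
      let d := count.keys.foldl
        (fun d s =>
          if s < wrd then d + PySem.Int.floordiv (st.2.1 * count.getD s 0) (count.getD wrd 0)
          else d) st.1
      let l := PySem.Int.floordiv (st.2.1 * (i + 1)) (count.getD wrd 0)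
      (d, l, count)) (1, 1, PySem.Dict.empty)
  st.1

-- ===== PORT B =====
def listPosition_alt (word : String) : Int :=
  let n : Int := PySem.Str.len word
  (PySem.List.pyRange 0 n 1).foldl
    (fun rank i =>
      let rest : List Char := PySem.List.slice word.toList (some i) none
      let denom : Int := (PySem.Set.ofList rest).foldl
        (fun d c => d * (Nat.factorial (rest.count c) : Int)) 1
      let smaller : Int := (PySem.Set.ofList rest).foldl
        (fun m s => if s < PySem.List.pyGetD rest 0 ' ' then m + (rest.count s : Int) else m) 0
      rank + PySem.Int.floordiv (smaller * (Nat.factorial ((n - 1 - i).toNat) : Int)) denom) 1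

-- ===== PRECONDITION & SPEC =====
def Spec_listPosition (word : String) (out : Int) : Prop := out = listPosition_alt word
instance (word : String) (out : Int) : Decidable (Spec_listPosition word out) := by unfold Spec_listPosition; infer_instance

-- ===== CLAIM (what is proved, stated in full; the proofs are below) =====
def Claim_equal_listPosition : Prop := ∀ (word : String), Dom_listPosition word → Spec_listPosition word (listPosition word)

-- ===== LEMMAS AND PROOFS =====

-- number-of-permutations machinery
def denomL (l : List Char) : ℕ := ∏ s ∈ l.toFinset, (l.count s).factorial
def permsL (l : List Char) : ℕ := Nat.multinomial l.toFinset l.count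

def tTerm : List Char → ℕ
  | [] => 0
  | c :: t => ∑ s ∈ (c :: t).toFinset, if s < c then permsL ((c :: t).erase s) else 0

def rankL : List Char → ℕ
  | [] => 1
  | c :: t => tTerm (c :: t) + rankL t

lemma denomL_pos (l : List Char) : 0 < denomL l := by
  unfold denomL
  exact Finset.prod_pos (fun s _ => Nat.factorial_pos _)

lemma sum_count_toFinset (l : List Char) : ∑ s ∈ l.toFinset, l.count s = l.length := by
  have h := Multiset.toFinset_sum_count_eq (l : Multiset Char)
  simpa using h

lemma perms_spec (l : List Char) : denomL l * permsL l = l.length.factorial := by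
  unfold denomL permsL
  rw [Nat.multinomial_spec, sum_count_toFinset]

lemma denom_erase {s : Char} {l : List Char} (h : s ∈ l) :
    l.count s * denomL (l.erase s) = denomL l := by
  classical
  unfold denomL
  have hsub : (l.erase s).toFinset ⊆ l.toFinset := by
    intro x hx
    rw [List.mem_toFinset] at hx ⊢
    exact List.mem_of_mem_erase hx
  have hext : ∏ x ∈ (l.erase s).toFinset, ((l.erase s).count x).factorial
      = ∏ x ∈ l.toFinset, ((l.erase s).count x).factorial := by
    refine (Finset.prod_subset hsub ?_).symm.symm
    intro x _ hxn
    have hz : (l.erase s).count x = 0 := by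
      rw [List.count_eq_zero]
      intro hmem
      exact hxn (List.mem_toFinset.mpr hmem)
    simp [hz]
  rw [hext]
  have hs : s ∈ l.toFinset := List.mem_toFinset.mpr h
  rw [← Finset.mul_prod_erase _ _ hs, ← Finset.mul_prod_erase _ (fun x => (l.count x).factorial) hs]
  have hrest : ∏ x ∈ l.toFinset.erase s, ((l.erase s).count x).factorial
      = ∏ x ∈ l.toFinset.erase s, (l.count x).factorial := by
    refine Finset.prod_congr rfl ?_
    intro x hx
    rw [List.count_erase_of_ne (Finset.ne_of_mem_erase hx)]
  rw [hrest, List.count_erase_self, ← mul_assoc]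
  congr 1
  have hpos : 0 < l.count s := List.count_pos_iff.mpr h
  obtain ⟨m, hm⟩ : ∃ m, l.count s = m + 1 := ⟨l.count s - 1, by omega⟩
  simp [hm, Nat.factorial_succ]

lemma length_erase_mem {s : Char} {l : List Char} (h : s ∈ l) :
    (l.erase s).length = l.length - 1 := by
  simp [List.length_erase, h]

lemma perms_cons (c : Char) (t : List Char) :
    (c :: t).count c * permsL (c :: t) = (t.length + 1) * permsL t := by
  have h1 : (c :: t).count c * denomL t = denomL (c :: t) := by
    have := denom_erase (s := c) (l := c :: t) (List.mem_cons_self)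
    simpa using this
  have h2 := perms_spec (c :: t)
  have h3 := perms_spec t
  have hd : 0 < denomL t := denomL_pos t
  have key : denomL t * ((c :: t).count c * permsL (c :: t)) = denomL t * ((t.length + 1) * permsL t) := by
    calc denomL t * ((c :: t).count c * permsL (c :: t))
        = ((c :: t).count c * denomL t) * permsL (c :: t) := by ring
      _ = denomL (c :: t) * permsL (c :: t) := by rw [h1]
      _ = (c :: t).length.factorial := h2
      _ = (t.length + 1) * t.length.factorial := by simp [Nat.factorial_succ]
      _ = (t.length + 1) * (denomL t * permsL t) := by rw [h3]
      _ = denomL t * ((t.length + 1) * permsL t) := by ring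
  exact Nat.eq_of_mul_eq_mul_left hd key

lemma perms_erase {s c : Char} {t : List Char} (h : s ∈ c :: t) (_hne : s ≠ c) :
    (c :: t).count c * permsL ((c :: t).erase s) = (c :: t).count s * permsL t := by
  have her := perms_spec ((c :: t).erase s)
  have hlen : ((c :: t).erase s).length = t.length := by
    rw [length_erase_mem h]; simp
  have h1 : (c :: t).count s * denomL ((c :: t).erase s) = denomL (c :: t) := denom_erase h
  have h2 : (c :: t).count c * denomL t = denomL (c :: t) := by
    have := denom_erase (s := c) (l := c :: t) (List.mem_cons_self)
    simpa using this
  have h3 := perms_spec t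
  have hd : 0 < denomL t := denomL_pos t
  have key : denomL t * ((c :: t).count c * permsL ((c :: t).erase s))
      = denomL t * ((c :: t).count s * permsL t) := by
    calc denomL t * ((c :: t).count c * permsL ((c :: t).erase s))
        = ((c :: t).count c * denomL t) * permsL ((c :: t).erase s) := by ring
      _ = denomL (c :: t) * permsL ((c :: t).erase s) := by rw [h2]
      _ = ((c :: t).count s * denomL ((c :: t).erase s)) * permsL ((c :: t).erase s) := by rw [h1]
      _ = (c :: t).count s * (denomL ((c :: t).erase s) * permsL ((c :: t).erase s)) := by ring
      _ = (c :: t).count s * t.length.factorial := by rw [her, hlen]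
      _ = (c :: t).count s * (denomL t * permsL t) := by rw [h3]
      _ = denomL t * ((c :: t).count s * permsL t) := by ring
  exact Nat.eq_of_mul_eq_mul_left hd key

lemma fdiv_exact {a b q : Int} (hb : 0 < b) (h : b * q = a) :
    PySem.Int.floordiv a b = q := by
  rw [PySem.Int.floordiv_eq_ediv_of_pos hb, ← h, Int.mul_ediv_cancel_left _ (ne_of_gt hb)]

lemma foldl_mul {α : Type} (l : List α) (g : α → Int) (a : Int) :
    l.foldl (fun d x => d * g x) a = a * (l.map g).prod := by
  induction l generalizing a with
  | nil => simp
  | cons x xs ih => simp [ih, mul_assoc]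

lemma toFinset_ofList (xs : List Char) : (PySem.Set.ofList xs).toFinset = xs.toFinset := by
  ext x
  simp [List.mem_toFinset, PySem.Set.mem_ofList]

lemma sum_ofList (xs : List Char) (f : Char → Int) :
    ((PySem.Set.ofList xs).map f).sum = ∑ x ∈ xs.toFinset, f x := by
  rw [← toFinset_ofList, List.sum_toFinset f (PySem.Set.nodup_ofList xs)]

lemma prod_ofList (xs : List Char) (f : Char → Int) :
    ((PySem.Set.ofList xs).map f).prod = ∏ x ∈ xs.toFinset, f x := by
  rw [← toFinset_ofList, List.prod_toFinset f (PySem.Set.nodup_ofList xs)]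

-- the per-position closed-form term equals tTerm
lemma term_core (c : Char) (t : List Char) :
    (∑ s ∈ (c :: t).toFinset, if s < c then ((c :: t).count s) else 0) * t.length.factorial
      = denomL (c :: t) * tTerm (c :: t) := by
  classical
  unfold tTerm
  rw [Finset.sum_mul, Finset.mul_sum]
  refine Finset.sum_congr rfl ?_
  intro s hs
  by_cases hlt : s < c
  · simp only [if_pos hlt]
    have hmem : s ∈ c :: t := List.mem_toFinset.mp hs
    have hspec := perms_spec ((c :: t).erase s)
    have hlen : ((c :: t).erase s).length = t.length := by
      rw [length_erase_mem hmem]; simp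
    have hde := denom_erase hmem
    calc (c :: t).count s * t.length.factorial
        = (c :: t).count s * (denomL ((c :: t).erase s) * permsL ((c :: t).erase s)) := by
          rw [hspec, hlen]
      _ = ((c :: t).count s * denomL ((c :: t).erase s)) * permsL ((c :: t).erase s) := by ring
      _ = denomL (c :: t) * permsL ((c :: t).erase s) := by rw [hde]
  · simp [hlt]

-- ===== B-side =====
lemma range_cast (n : ℕ) :
    PySem.List.pyRange 0 (n : Int) 1 = (List.range n).map (fun k : ℕ => (k : Int)) := by
  rw [PySem.List.pyRange_one]
  have h : ((n : Int) - 0).toNat = n := by omega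
  rw [h]
  refine List.map_congr_left ?_
  intro k _
  simp

lemma B_term (w : List Char) (k : ℕ) (hk : k < w.length) :
    PySem.Int.floordiv
      (((PySem.Set.ofList (w.drop k)).foldl
          (fun m s => if s < PySem.List.pyGetD (w.drop k) 0 ' ' then m + ((w.drop k).count s : Int) else m) 0)
        * (Nat.factorial (((w.length : Int) - 1 - (k : Int)).toNat) : Int))
      ((PySem.Set.ofList (w.drop k)).foldl (fun d c => d * (Nat.factorial ((w.drop k).count c) : Int)) 1)
    = (tTerm (w.drop k) : Int) := by
  have hne : w.drop k ≠ [] := by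
    intro hnil
    have := List.length_drop (l := w) (i := k)
    rw [hnil] at this
    simp at this
    omega
  obtain ⟨c, t, hct⟩ : ∃ c t, w.drop k = c :: t := by
    cases hd : w.drop k with
    | nil => exact absurd hd hne
    | cons c t => exact ⟨c, t, rfl⟩
  have hlen : (((w.length : Int) - 1 - (k : Int)).toNat) = t.length := by
    have h1 := List.length_drop (l := w) (i := k)
    rw [hct] at h1
    simp at h1
    omega
  rw [hct, hlen]
  have h0 : PySem.List.pyGetD (c :: t) 0 ' ' = c := by
    have h00 : ((0 : ℕ) : Int) = 0 := rfl
    rw [← h00, PySem.List.pyGetD_natCast]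
    rfl
  rw [h0]
  have hsm : (PySem.Set.ofList (c :: t)).foldl
      (fun m s => if s < c then m + (((c :: t)).count s : Int) else m) 0
      = ∑ s ∈ (c :: t).toFinset, (if s < c then (((c :: t)).count s : Int) else 0) := by
    rw [PySem.List.foldl_congr_mem _ _
      (fun m s => m + (if s < c then (((c :: t)).count s : Int) else 0)) _
      (by intro acc x _; by_cases h : x < c <;> simp [h])]
    rw [PySem.List.foldl_add, sum_ofList]
    simp
  have hdm : (PySem.Set.ofList (c :: t)).foldl
      (fun d x => d * (Nat.factorial ((c :: t).count x) : Int)) 1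
      = (denomL (c :: t) : Int) := by
    rw [foldl_mul, prod_ofList]
    unfold denomL
    push_cast
    ring
  rw [hsm, hdm]
  apply fdiv_exact
  · exact_mod_cast denomL_pos (c :: t)
  · have h := term_core c t
    unfold tTerm at h
    have h2 := congrArg (fun n : ℕ => (n : Int)) h
    push_cast at h2
    unfold tTerm
    push_cast
    linarith [h2]

lemma sum_tTerm (w : List Char) :
    ((List.range w.length).map (fun k => (tTerm (w.drop k) : Int))).sum = (rankL w : Int) - 1 := by
  induction w with
  | nil => simp [rankL]
  | cons c t ih =>
    rw [List.length_cons, List.range_succ_eq_map, List.map_cons, List.map_map]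
    have hmap : (List.map ((fun k => (tTerm ((c :: t).drop k) : Int)) ∘ Nat.succ) (List.range t.length))
        = List.map (fun k => (tTerm (t.drop k) : Int)) (List.range t.length) := by
      refine List.map_congr_left ?_
      intro k _
      simp [Function.comp, List.drop_succ_cons]
    rw [hmap, List.sum_cons, ih]
    have hr : rankL (c :: t) = tTerm (c :: t) + rankL t := rfl
    rw [hr]
    simp only [List.drop_zero]
    push_cast
    ring

lemma B_eq (word : String) : listPosition_alt word = (rankL word.toList : Int) := by
  simp only [listPosition_alt, PySem.Str.len]
  rw [range_cast, List.foldl_map]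
  rw [PySem.List.foldl_congr_mem _ _
    (fun rank k => rank + (tTerm (word.toList.drop k) : Int)) _ ?_]
  · rw [PySem.List.foldl_add, sum_tTerm]
    ring
  · intro acc k hk
    have hk' : k < word.toList.length := List.mem_range.mp hk
    have hsl : PySem.List.slice word.toList (some ((k : ℕ) : Int)) none = word.toList.drop k :=
      PySem.List.slice_from_natCast word.toList k
    rw [hsl, B_term word.toList k hk']

-- ===== A-side =====
def bodyR (r : List Char) (st : Int × Int × PySem.Dict Char Int) (k : ℕ) :
    Int × Int × PySem.Dict Char Int :=
  let wrd : Char := r.getD k ' '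
  let count := st.2.2.modify wrd 0 (fun x => x + 1)
  let d := count.keys.foldl
    (fun d s =>
      if s < wrd then d + PySem.Int.floordiv (st.2.1 * count.getD s 0) (count.getD wrd 0)
      else d) st.1
  let l := PySem.Int.floordiv (st.2.1 * ((k : Int) + 1)) (count.getD wrd 0)
  (d, l, count)

lemma count_app (s c : Char) (r' : List Char) :
    List.count s (r' ++ [c]) = List.count s (c :: r'.reverse) := by
  simp [List.count_append, List.count_cons, List.count_reverse]

lemma toFinset_app (c : Char) (r' : List Char) :
    (r' ++ [c]).toFinset = (c :: r'.reverse).toFinset := by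
  ext x
  simp [List.mem_toFinset]

lemma A_step (c : Char) (r' : List Char) :
    bodyR (r' ++ [c]) ((rankL r'.reverse : Int), (permsL r'.reverse : Int), PySem.Dict.counter r') r'.length
      = ((rankL (c :: r'.reverse) : Int), (permsL (c :: r'.reverse) : Int), PySem.Dict.counter (r' ++ [c])) := by
  have hw : (r' ++ [c]).getD r'.length ' ' = c := by
    simp [List.getD_eq_getElem?_getD]
  have hcount : (PySem.Dict.counter r').modify c 0 (fun x => x + 1)
      = PySem.Dict.counter (r' ++ [c]) := by
    simp [PySem.Dict.counter, List.foldl_append]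
  have hcc : c ∈ c :: r'.reverse := List.mem_cons_self
  have hcpos : (0 : Int) < ((List.count c (r' ++ [c]) : ℕ) : Int) := by
    rw [count_app]
    exact_mod_cast List.count_pos_iff.mpr hcc
  simp only [bodyR]
  rw [hw, hcount, PySem.Dict.keys_counter]
  refine congrArg₂ Prod.mk ?_ (congrArg₂ Prod.mk ?_ rfl)
  · -- the d component
    rw [PySem.List.foldl_congr_mem _ _
      (fun d s => d + (if s < c then ((permsL ((c :: r'.reverse).erase s) : ℕ) : Int) else 0)) _ ?_]
    · rw [PySem.List.foldl_add, sum_ofList, toFinset_app]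
      have ht : (tTerm (c :: r'.reverse) : Int)
          = ∑ s ∈ (c :: r'.reverse).toFinset,
              (if s < c then ((permsL ((c :: r'.reverse).erase s) : ℕ) : Int) else 0) := by
        unfold tTerm
        push_cast
        rfl
      have hr : (rankL (c :: r'.reverse) : Int)
          = (tTerm (c :: r'.reverse) : Int) + (rankL r'.reverse : Int) := by
        rw [show rankL (c :: r'.reverse) = tTerm (c :: r'.reverse) + rankL r'.reverse from rfl]
        push_cast
        ring
      rw [← ht, hr]
      ring
    · intro acc s hsmem
      have hs' : s ∈ c :: r'.reverse := by
        have h1 : s ∈ r' ++ [c] := (PySem.Set.mem_ofList _ _).mp hsmem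
        rcases List.mem_append.mp h1 with h | h
        · exact List.mem_cons_of_mem _ (List.mem_reverse.mpr h)
        · simp only [List.mem_singleton] at h
          simp [h]
      by_cases hlt : s < c
      · simp only [if_pos hlt, PySem.Dict.getD_counter]
        congr 1
        apply fdiv_exact hcpos
        rw [count_app, count_app]
        have h := perms_erase hs' (ne_of_lt hlt)
        have h2 : (List.count c (c :: r'.reverse) * permsL ((c :: r'.reverse).erase s) : ℕ)
            = permsL r'.reverse * List.count s (c :: r'.reverse) := by
          have hh : (c :: r'.reverse).count c * permsL ((c :: r'.reverse).erase s)
              = (c :: r'.reverse).count s * permsL r'.reverse := h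
          rw [hh]
          ring
        exact_mod_cast h2
      · simp [hlt]
  · -- the l component
    simp only [PySem.Dict.getD_counter]
    apply fdiv_exact hcpos
    rw [count_app]
    have h := perms_cons c r'.reverse
    rw [List.length_reverse] at h
    have h2 : (List.count c (c :: r'.reverse) * permsL (c :: r'.reverse) : ℕ)
        = permsL r'.reverse * (r'.length + 1) := by
      have hh : (c :: r'.reverse).count c * permsL (c :: r'.reverse)
          = (r'.length + 1) * permsL r'.reverse := h
      rw [hh]
      ring
    exact_mod_cast h2

lemma A_fold (r : List Char) :
    (List.range r.length).foldl (bodyR r) (1, 1, PySem.Dict.empty)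
      = ((rankL r.reverse : Int), (permsL r.reverse : Int), PySem.Dict.counter r) := by
  induction r using List.reverseRecOn with
  | nil =>
    simp [rankL, permsL, PySem.Dict.counter]
  | append_singleton r' c ih =>
    rw [List.length_append, List.length_singleton, List.range_succ, List.foldl_append]
    have hpre : (List.range r'.length).foldl (bodyR (r' ++ [c])) (1, 1, PySem.Dict.empty)
        = (List.range r'.length).foldl (bodyR r') (1, 1, PySem.Dict.empty) := by
      refine PySem.List.foldl_congr_mem _ _ _ _ ?_
      intro st k hkmem
      have hk : k < r'.length := List.mem_range.mp hkmem
      unfold bodyR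
      have hg : (r' ++ [c]).getD k ' ' = r'.getD k ' ' := by
        simp [List.getD_eq_getElem?_getD, List.getElem?_append_left hk]
      rw [hg]
    rw [hpre, ih]
    simp only [List.foldl_cons, List.foldl_nil]
    rw [A_step]
    simp [List.reverse_append]

lemma A_eq (word : String) : listPosition word = (rankL word.toList : Int) := by
  simp only [listPosition, PySem.Str.len]
  rw [range_cast, List.foldl_map]
  refine Eq.trans (congrArg (fun p => p.1)
    (PySem.List.foldl_congr_mem _ _ (bodyR word.toList.reverse) _ ?_)) ?_
  case refine_2 =>
    have hlr : List.range word.toList.length = List.range word.toList.reverse.length := by simp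
    rw [hlr, A_fold, List.reverse_reverse]
  case refine_1 =>
    intro st k hkmem
    have hk : k < word.toList.length := List.mem_range.mp hkmem
    unfold bodyR
    have hcast : ((word.toList.length : Int) - 1 - (k : Int))
        = ((word.toList.length - 1 - k : ℕ) : Int) := by omega
    rw [hcast, PySem.List.pyGetD_natCast]
    have hrev : word.toList.reverse.getD k ' ' = word.toList.getD (word.toList.length - 1 - k) ' ' := by
      rw [List.getD_eq_getElem?_getD, List.getD_eq_getElem?_getD, List.getElem?_reverse hk]
    rw [hrev]

-- ===== VERDICT (by name: the statement is the Claim_ definition above) =====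
theorem listPosition_spec : Claim_equal_listPosition := by
  intro word _
  unfold Spec_listPosition
  rw [A_eq, B_eq]
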